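-- pv_equiv track=rewrite | github.com/pc5401/my_BOJ | 백준/Gold/1633. 최고의 팀 만들기/최고의 팀 만들기.py | solve
-- ===== SOURCE A (Python) =====
-- INF_NEG = -10**18
--
-- def solve(pairs):
--     dp = [[INF_NEG]*16 for _ in range(16)]
--     dp[0][0] = 0
--     for w, b in pairs:
--         new = [row[:] for row in dp]
--         for j in range(16):
--             for k in range(16):
--                 if dp[j][k] == INF_NEG:
--                     continue
--                 if j < 15:
--                     if new[j+1][k] < dp[j][k] + w:
--                         new[j+1][k] = dp[j][k] + w
--                 if k < 15:
--                     if new[j][k+1] < dp[j][k] + b: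
--                         new[j][k+1] = dp[j][k] + b
--         dp = new
--     return dp[15][15]
-- ===== SOURCE B (Python) =====
-- INF_NEG = -10**18
--
--
-- def _pull(g, w, b, j, k):
--     # best completion of the current suffix when j whites and k blacks are
--     # already assigned; None when no completion reaches 15+15
--     best = g[(j, k)]
--     if j < 15 and g[(j + 1, k)] is not None:
--         c = w + g[(j + 1, k)]
--         if best is None or c > best:
--             best = c
--     if k < 15 and g[(j, k + 1)] is not None:
--         c = b + g[(j, k + 1)]
--         if best is None or c > best:
--             best = c
--     return best
--
--
-- def solve(pairs):
--     # backward ("pull") dynamic programming over suffixes: g[(j, k)] is the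
--     # best rating still obtainable from the remaining suffix when j whites
--     # and k blacks have already been chosen (None = infeasible)
--     g = {(j, k): (0 if j == 15 and k == 15 else None)
--          for j in range(16) for k in range(16)}
--     for w, b in reversed(pairs):
--         g = {(j, k): _pull(g, w, b, j, k)
--              for j in range(16) for k in range(16)}
--     r = g[(0, 0)]
--     return INF_NEG if r is None else r
-- ===== Notes on version B (the rewrite author's own statement) =====
-- stated objective: alternative
-- what changed: Forward push-style DP over prefixes on a 16x16 list table with a -10**18 sentinel and in-place compare-and-update writes is replaced by a backward pull-style DP over suffixes: a dict maps (whites used, blacks used) to the best completion of the remaining suffix, with None for infeasible states and each new layer built by a comprehension reading only the previous layer.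
import Mathlib
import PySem

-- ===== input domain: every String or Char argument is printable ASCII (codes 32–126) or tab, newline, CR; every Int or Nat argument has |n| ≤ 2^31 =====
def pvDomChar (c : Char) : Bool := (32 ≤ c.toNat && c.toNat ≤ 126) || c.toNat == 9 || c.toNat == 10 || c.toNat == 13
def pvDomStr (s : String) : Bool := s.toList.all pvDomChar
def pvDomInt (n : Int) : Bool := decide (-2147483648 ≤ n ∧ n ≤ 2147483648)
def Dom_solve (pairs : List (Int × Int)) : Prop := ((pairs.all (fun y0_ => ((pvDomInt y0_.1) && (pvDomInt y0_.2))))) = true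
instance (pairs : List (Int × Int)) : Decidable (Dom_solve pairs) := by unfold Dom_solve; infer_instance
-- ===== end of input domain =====

-- B replaces A's forward push-style table DP (16×16 lists, -10^18 sentinel, in-place
-- compare-and-update) by a backward pull-style DP over suffixes using a dict of
-- Option values (none = infeasible); objective: alternative (same cost).

-- B replaces A's forward push-style table DP over prefixes (16x16 nested lists,
-- -10^18 sentinel, in-place compare-and-update writes) by a backward pull-style DP
-- over suffixes (a dict from (whites used, blacks used) to the best completion,
-- none = infeasible); objective: alternative (a different decomposition, same cost).

-- ===== PORT A =====
def INF_NEG : Int := -10^18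

def get2 (T : List (List Int)) (j k : Int) : Int :=
  PySem.List.pyGetD (PySem.List.pyGetD T j []) k 0

def set2 (T : List (List Int)) (j k : Int) (v : Int) : List (List Int) :=
  PySem.List.pySetD T j (PySem.List.pySetD (PySem.List.pyGetD T j []) k v)

def cellBody (dp : List (List Int)) (w b : Int) (N : List (List Int)) (j k : Int) :
    List (List Int) :=
  if get2 dp j k == INF_NEG then N
  else
    let N1 := if j < 15 then
        (if get2 N (j+1) k < get2 dp j k + w then set2 N (j+1) k (get2 dp j k + w) else N)
      else N
    if k < 15 then
        (if get2 N1 j (k+1) < get2 dp j k + b then set2 N1 j (k+1) (get2 dp j k + b) else N1)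
      else N1

def pairStep (dp : List (List Int)) (p : Int × Int) : List (List Int) :=
  let w := p.1
  let b := p.2
  let new := dp.map (fun row => PySem.List.slice row none none)
  (PySem.List.pyRange 0 16 1).foldl (fun N j =>
    (PySem.List.pyRange 0 16 1).foldl (fun N k => cellBody dp w b N j k) N) new

def solve (pairs : List (Int × Int)) : Int :=
  let dp0 := (PySem.List.pyRange 0 16 1).map (fun _ => List.replicate 16 INF_NEG)
  let dp1 := set2 dp0 0 0 0
  get2 (pairs.foldl pairStep dp1) 15 15

-- ===== PORT B =====
def idxAll : List (Int × Int) :=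
  (PySem.List.pyRange 0 16 1).flatMap (fun j => (PySem.List.pyRange 0 16 1).map (fun k => (j, k)))

def layer (h : Int × Int → Option Int) : PySem.Dict (Int × Int) (Option Int) :=
  idxAll.foldl (fun d jk => d.insert jk (h jk)) PySem.Dict.empty

def pullB (g : PySem.Dict (Int × Int) (Option Int)) (w b j k : Int) : Option Int :=
  let best := PySem.Dict.getD g (j, k) none
  let best := if j < 15 then
      match PySem.Dict.getD g (j+1, k) none with
      | some t =>
        let c := w + t
        (match best with
         | none => some c
         | some bv => if bv < c then some c else some bv)
      | none => best
    else best
  if k < 15 then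
    match PySem.Dict.getD g (j, k+1) none with
    | some t =>
      let c := b + t
      (match best with
       | none => some c
       | some bv => if bv < c then some c else some bv)
    | none => best
  else best

def solve_alt (pairs : List (Int × Int)) : Int :=
  let g0 := layer (fun jk => if jk.1 == 15 && jk.2 == 15 then some 0 else none)
  let g := pairs.reverse.foldl (fun g p => layer (fun jk => pullB g p.1 p.2 jk.1 jk.2)) g0
  match PySem.Dict.getD g (0, 0) none with
  | some r => r
  | none => INF_NEG

-- ===== PRECONDITION & SPEC =====
def Spec_solve (pairs : List (Int × Int)) (out : Int) : Prop := out = solve_alt pairs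
instance (pairs : List (Int × Int)) (out : Int) : Decidable (Spec_solve pairs out) := by unfold Spec_solve; infer_instance

-- ===== CLAIM (what is proved, stated in full; the proofs are below) =====
def Claim_equal_solve : Prop := ∀ (pairs : List (Int × Int)), Dom_solve pairs → Spec_solve pairs (solve pairs)

-- ===== LEMMAS AND PROOFS =====
def omax : Option Int → Option Int → Option Int
  | none, y => y
  | x, none => x
  | some a, some b => some (max a b)

def oadd (u : Int) : Option Int → Option Int
  | none => none
  | some x => some (u + x)

def wpart (w : Int) (F : Nat → Nat → Option Int) : Nat → Nat → Option Int
  | 0, _ => none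
  | a+1, c => oadd w (F a c)

def bpart (b : Int) (F : Nat → Nat → Option Int) : Nat → Nat → Option Int
  | _, 0 => none
  | a, c+1 => oadd b (F a c)

def cstep (w b : Int) (F : Nat → Nat → Option Int) (a c : Nat) : Option Int :=
  omax (F a c) (omax (wpart w F a c) (bpart b F a c))

def cb : List (Int × Int) → Nat → Nat → Option Int
  | [], a, c => if a = 0 ∧ c = 0 then some 0 else none
  | p :: L, a, c => cstep p.1 p.2 (cb L) a c

def tableOf (g : Int → Int → Int) : List (List Int) :=
  (List.range 16).map (fun (j : Nat) => (List.range 16).map (fun (k : Nat) => g (j : Int) (k : Int)))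

def reprF (L : List (Int × Int)) (j k : Int) : Int :=
  (cb L j.toNat k.toNat).getD INF_NEG

def DomP (L : List (Int × Int)) : Prop :=
  ∀ q ∈ L, (-2147483648 ≤ q.1 ∧ q.1 ≤ 2147483648) ∧ (-2147483648 ≤ q.2 ∧ q.2 ≤ 2147483648)

def cellValW (f : Int → Int → Int) (w : Int) (n : Nat) (j k : Int) : Int :=
  if 1 ≤ j ∧ (j-1)*16 + k < (n:Int) ∧ f (j-1) k ≠ INF_NEG
  then max (f j k) (f (j-1) k + w) else f j k

def cellVal (f : Int → Int → Int) (w b : Int) (n : Nat) (j k : Int) : Int :=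
  if 1 ≤ k ∧ j*16 + (k-1) < (n:Int) ∧ f j (k-1) ≠ INF_NEG
  then max (cellValW f w n j k) (f j (k-1) + b) else cellValW f w n j k

theorem omax_comm (x y : Option Int) : omax x y = omax y x := by
  cases x <;> cases y <;> simp [omax] <;> exact max_comm _ _

theorem omax_assoc (x y z : Option Int) : omax (omax x y) z = omax x (omax y z) := by
  cases x <;> cases y <;> cases z <;> simp [omax, max_assoc]

theorem omax_left_comm (x y z : Option Int) : omax x (omax y z) = omax y (omax x z) := by
  cases x <;> cases y <;> cases z <;> simp [omax, max_left_comm] <;> exact max_comm _ _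

theorem oadd_omax (u : Int) (x y : Option Int) : oadd u (omax x y) = omax (oadd u x) (oadd u y) := by
  cases x <;> cases y <;> simp [omax, oadd, max_add_add_left]

theorem oadd_oadd (u v : Int) (x : Option Int) : oadd u (oadd v x) = oadd (u + v) x := by
  cases x <;> simp [oadd]; ring

theorem omax_none_left (x : Option Int) : omax none x = x := rfl

theorem omax_none_right (x : Option Int) : omax x none = x := by cases x <;> rfl

theorem oadd_none (u : Int) : oadd u none = none := rfl

set_option maxHeartbeats 1600000 in
theorem cstep_comm (w1 b1 w2 b2 : Int) (F : Nat → Nat → Option Int) (a c : Nat) :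
    cstep w1 b1 (fun a c => cstep w2 b2 F a c) a c
      = cstep w2 b2 (fun a c => cstep w1 b1 F a c) a c := by
  rcases a with _ | a <;> rcases c with _ | c
  · simp [cstep, wpart, bpart, omax_none_right,
      omax_assoc, omax_comm, omax_left_comm]
  · rcases c with _ | c <;>
    simp [cstep, wpart, bpart, oadd_omax, oadd_oadd, oadd_none, omax_none_left, omax_none_right,
      omax_assoc, omax_comm, omax_left_comm, Int.add_comm, Int.add_left_comm]
  · rcases a with _ | a <;>
    simp [cstep, wpart, bpart, oadd_omax, oadd_oadd, oadd_none, omax_none_left, omax_none_right,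
      omax_assoc, omax_comm, omax_left_comm, Int.add_comm, Int.add_left_comm]
  · rcases a with _ | a <;> rcases c with _ | c <;>
    simp [cstep, wpart, bpart, oadd_omax, oadd_oadd, oadd_none, omax_none_left, omax_none_right,
      omax_assoc, omax_comm, omax_left_comm, Int.add_comm, Int.add_left_comm]

theorem cb_append (L : List (Int × Int)) (p : Int × Int) (a c : Nat) :
    cb (L ++ [p]) a c = cstep p.1 p.2 (cb L) a c := by
  induction L generalizing a c with
  | nil => rcases a with _ | a <;> rcases c with _ | c <;>
      simp [cb, cstep, wpart, bpart, omax, oadd]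
  | cons q L ih =>
    have : cb ((q :: L) ++ [p]) a c = cstep q.1 q.2 (fun a c => cstep p.1 p.2 (cb L) a c) a c := by
      simp only [List.cons_append, cb]
      rcases a with _ | a <;> rcases c with _ | c <;>
        simp [cstep, wpart, bpart, ih]
    rw [this, ← cstep_comm]
    simp only [cb]

theorem INF_NEG_eq : INF_NEG = -1000000000000000000 := by norm_num [INF_NEG]

theorem omax_eq_some (x y : Option Int) (v : Int) (h : omax x y = some v) :
    x = some v ∨ y = some v := by
  cases x with
  | none => right; exact h
  | some a =>
    cases y with
    | none => left; exact h
    | some b =>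
      simp only [omax, Option.some_inj] at h
      rcases max_choice a b with hm | hm <;> [left; right] <;>
        simp [← h, hm]

theorem cb_bound (L : List (Int × Int)) (hL : DomP L) :
    ∀ a c (v : Int), cb L a c = some v →
      -(((a:Int)+(c:Int)) * 2147483648) ≤ v ∧ v ≤ ((a:Int)+(c:Int)) * 2147483648 := by
  induction L with
  | nil =>
    intro a c v h
    simp only [cb] at h
    split_ifs at h with hac
    · obtain ⟨rfl, rfl⟩ := hac
      simp only [Option.some_inj] at h
      omega
  | cons p L ih =>
    have hp := hL p List.mem_cons_self
    have hL' : DomP L := fun q hq => hL q (List.mem_cons_of_mem _ hq)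
    intro a c v h
    simp only [cb, cstep] at h
    rcases omax_eq_some _ _ _ h with h1 | h2
    · exact ih hL' a c v h1
    · rcases omax_eq_some _ _ _ h2 with h3 | h4
      · rcases a with _ | a'
        · exact absurd h3 (by simp [wpart])
        · simp only [wpart] at h3
          cases hcb : cb L a' c with
          | none => rw [hcb] at h3; exact absurd h3 (by simp [oadd])
          | some t =>
            rw [hcb] at h3
            simp only [oadd, Option.some_inj] at h3
            obtain ⟨b1, b2⟩ := ih hL' a' c t hcb
            constructor <;> push_cast <;> push_cast at b1 b2 <;> nlinarith [hp.1.1, hp.1.2]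
      · rcases c with _ | c'
        · exact absurd h4 (by simp [bpart])
        · simp only [bpart] at h4
          cases hcb : cb L a c' with
          | none => rw [hcb] at h4; exact absurd h4 (by simp [oadd])
          | some t =>
            rw [hcb] at h4
            simp only [oadd, Option.some_inj] at h4
            obtain ⟨b1, b2⟩ := ih hL' a c' t hcb
            constructor <;> push_cast <;> push_cast at b1 b2 <;> nlinarith [hp.2.1, hp.2.2]

theorem cb_val_bounds (L : List (Int × Int)) (hL : DomP L) (a c : Nat) (ha : a ≤ 15) (hc : c ≤ 15)
    (v : Int) (h : cb L a c = some v) :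
    -64424509440 ≤ v ∧ v ≤ 64424509440 := by
  obtain ⟨b1, b2⟩ := cb_bound L hL a c v h
  have c1 : ((a:Int) + (c:Int)) * 2147483648 ≤ 64424509440 := by
    have : ((a:Int) + (c:Int)) ≤ 30 := by omega
    nlinarith
  have c2 : -64424509440 ≤ -(((a:Int)+(c:Int)) * 2147483648) := by omega
  omega

theorem cb_ne_INF (L : List (Int × Int)) (hL : DomP L) (a c : Nat) (ha : a ≤ 15) (hc : c ≤ 15)
    (v : Int) (h : cb L a c = some v) : v ≠ INF_NEG := by
  obtain ⟨b1, b2⟩ := cb_val_bounds L hL a c ha hc v h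
  rw [INF_NEG_eq]
  omega

theorem reprF_natCast (L : List (Int × Int)) (j k : Nat) :
    reprF L (j:Int) (k:Int) = (cb L j k).getD INF_NEG := by
  simp [reprF]

theorem omax_getD (x : Option Int) (u : Int) (hu : INF_NEG ≤ u) :
    max (x.getD INF_NEG) u = (omax x (some u)).getD INF_NEG := by
  cases x with
  | none => simp [omax, max_eq_right hu]
  | some a => simp [omax]

theorem get2_tableOf (g : Int → Int → Int) (j k : Int)
    (hj0 : 0 ≤ j) (hj : j < 16) (hk0 : 0 ≤ k) (hk : k < 16) :
    get2 (tableOf g) j k = g j k := by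
  have hjn : j.toNat < 16 := by omega
  have hkn : k.toNat < 16 := by omega
  rw [get2, PySem.List.pyGetD_of_nonneg _ _ hj0, tableOf]
  rw [List.getD_eq_getElem?_getD, List.getElem?_map, List.getElem?_range hjn]
  simp only [Option.map_some, Option.getD_some]
  rw [PySem.List.pyGetD_of_nonneg _ _ hk0]
  rw [List.getD_eq_getElem?_getD, List.getElem?_map, List.getElem?_range hkn]
  simp only [Option.map_some, Option.getD_some]
  congr 1 <;> omega

theorem set2_tableOf (g : Int → Int → Int) (J K : Int) (v : Int)
    (hj0 : 0 ≤ J) (hj : J < 16) (hk0 : 0 ≤ K) (hk : K < 16) :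
    set2 (tableOf g) J K v = tableOf (fun j k => if j = J ∧ k = K then v else g j k) := by
  have hjn : J.toNat < 16 := by omega
  have hkn : K.toNat < 16 := by omega
  rw [set2, PySem.List.pySetD_of_nonneg _ _ hj0, PySem.List.pySetD_of_nonneg _ _ hk0,
    PySem.List.pyGetD_of_nonneg _ _ hj0]
  have hrow : (tableOf g).getD J.toNat [] = (List.range 16).map (fun (k : Nat) => g (J : Int) (k : Int)) := by
    simp only [tableOf]
    rw [List.getD_eq_getElem?_getD, List.getElem?_map, List.getElem?_range hjn]
    simp only [Option.map_some, Option.getD_some]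
    apply List.map_congr_left
    intro k _
    congr 1
    omega
  rw [hrow]
  apply List.ext_getElem
  · simp [tableOf]
  intro i h1 h2
  simp only [tableOf, List.length_set, List.length_map, List.length_range] at h1 h2
  by_cases hij : J.toNat = i
  · subst hij
    rw [List.getElem_set_self (by simpa [tableOf] using h1)]
    simp only [tableOf, List.getElem_map, List.getElem_range]
    apply List.ext_getElem
    · simp
    intro i2 g1 g2
    simp only [List.length_set, List.length_map, List.length_range] at g1 g2
    by_cases hik : K.toNat = i2
    · subst hik
      rw [List.getElem_set_self (by simpa using g1)]
      rw [List.getElem_map, List.getElem_range, if_pos (by constructor <;> omega)]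
    · rw [List.getElem_set_ne hik (by simpa using g1)]
      rw [List.getElem_map, List.getElem_range, List.getElem_map, List.getElem_range,
        if_neg (by rintro ⟨e1, e2⟩; exact hik (by omega))]
      have hJc : ((J.toNat : Int)) = J := by omega
      rw [hJc]
  · rw [List.getElem_set_ne hij (by simpa [tableOf] using h1)]
    simp only [tableOf, List.getElem_map, List.getElem_range]
    apply List.map_congr_left
    intro k _
    rw [if_neg (by rintro ⟨e1, e2⟩; exact hij (by omega))]

theorem tableOf_congr (g g' : Int → Int → Int)
    (h : ∀ (j k : Nat), j < 16 → k < 16 → g (j : Int) (k : Int) = g' (j : Int) (k : Int)) :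
    tableOf g = tableOf g' := by
  unfold tableOf
  apply List.map_congr_left
  intro j hj
  apply List.map_congr_left
  intro k hk
  exact h j k (List.mem_range.mp hj) (List.mem_range.mp hk)

set_option maxRecDepth 4096 in
theorem idx_enc : idxAll = (List.range 256).map (fun n => (((n/16 : Nat) : Int), ((n%16 : Nat) : Int))) := by
  decide

theorem foldl_range_inv {α : Type} (g : α → Nat → α) (inv : Nat → α → Prop) (N : Nat) (s : α)
    (h0 : inv 0 s) (hs : ∀ n t, n < N → inv n t → inv (n+1) (g t n)) :
    inv N ((List.range N).foldl g s) := by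
  induction N with
  | zero => simpa using h0
  | succ m ih =>
    rw [List.range_succ, List.foldl_append]
    exact hs m _ (Nat.lt_succ_self m) (ih (fun n t hn => hs n t (Nat.lt_succ_of_lt hn)))

theorem cellValW_succ (f : Int → Int → Int) (w : Int) (n J K : Nat) (hn : n = J*16+K)
    (hK : K < 16) (hNE : f (J:Int) (K:Int) ≠ INF_NEG) (j k : Nat) (hk : k < 16) :
    cellValW f w (n+1) (j:Int) (k:Int) =
      if j = J+1 ∧ k = K then max (cellValW f w n (j:Int) (k:Int)) (f (J:Int) (K:Int) + w)
      else cellValW f w n (j:Int) (k:Int) := by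
  by_cases hjk : j = J+1 ∧ k = K
  · have e : ((j:Int)) - 1 = (J:Int) := by omega
    have ek : ((k:Int)) = (K:Int) := by omega
    have hFalse : ¬(1 ≤ (j:Int) ∧ ((j:Int)-1)*16 + (k:Int) < (n:Int) ∧
        f ((j:Int)-1) (k:Int) ≠ INF_NEG) := by
      rintro ⟨-, h2, -⟩
      omega
    have hTrue : (1 ≤ (j:Int) ∧ ((j:Int)-1)*16 + (k:Int) < ((n+1:Nat):Int) ∧
        f ((j:Int)-1) (k:Int) ≠ INF_NEG) := by
      refine ⟨by omega, by omega, ?_⟩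
      rw [e, ek]
      exact hNE
    rw [if_pos hjk]
    simp only [cellValW]
    rw [if_pos hTrue, if_neg hFalse, e, ek]
  · have hiff : (1 ≤ (j:Int) ∧ ((j:Int)-1)*16 + (k:Int) < ((n+1:Nat):Int) ∧
        f ((j:Int)-1) (k:Int) ≠ INF_NEG) ↔
        (1 ≤ (j:Int) ∧ ((j:Int)-1)*16 + (k:Int) < (n:Int) ∧ f ((j:Int)-1) (k:Int) ≠ INF_NEG) := by
      constructor
      · rintro ⟨h1, h2, h3⟩
        exact ⟨h1, by omega, h3⟩
      · rintro ⟨h1, h2, h3⟩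
        exact ⟨h1, by omega, h3⟩
    rw [if_neg hjk]
    simp only [cellValW]
    rw [if_congr hiff rfl rfl]

theorem cellVal_succ (f : Int → Int → Int) (w b : Int) (n J K : Nat) (hn : n = J*16+K)
    (hJ : J < 16) (hK : K < 16) (hNE : f (J:Int) (K:Int) ≠ INF_NEG)
    (j k : Nat) (hj : j < 16) (hk : k < 16) :
    cellVal f w b (n+1) (j:Int) (k:Int) =
      if j = J+1 ∧ k = K then max (cellVal f w b n (j:Int) (k:Int)) (f (J:Int) (K:Int) + w)
      else if j = J ∧ k = K+1 then max (cellVal f w b n (j:Int) (k:Int)) (f (J:Int) (K:Int) + b)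
      else cellVal f w b n (j:Int) (k:Int) := by
  by_cases c1 : j = J+1 ∧ k = K
  · have hB1 : ¬(1 ≤ (k:Int) ∧ (j:Int)*16 + ((k:Int)-1) < ((n+1:Nat):Int) ∧
        f (j:Int) ((k:Int)-1) ≠ INF_NEG) := by
      rintro ⟨h1, h2, -⟩; omega
    have hB0 : ¬(1 ≤ (k:Int) ∧ (j:Int)*16 + ((k:Int)-1) < (n:Int) ∧
        f (j:Int) ((k:Int)-1) ≠ INF_NEG) := by
      rintro ⟨h1, h2, -⟩; omega
    rw [if_pos c1]
    simp only [cellVal]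
    rw [if_neg hB1, if_neg hB0, cellValW_succ f w n J K hn hK hNE _ _ hk, if_pos c1]
  · by_cases c2 : j = J ∧ k = K+1
    · have e : ((k:Int)) - 1 = (K:Int) := by omega
      have ej : ((j:Int)) = (J:Int) := by omega
      have hB1 : (1 ≤ (k:Int) ∧ (j:Int)*16 + ((k:Int)-1) < ((n+1:Nat):Int) ∧
          f (j:Int) ((k:Int)-1) ≠ INF_NEG) := by
        refine ⟨by omega, by omega, ?_⟩
        rw [e, ej]
        exact hNE
      have hB0 : ¬(1 ≤ (k:Int) ∧ (j:Int)*16 + ((k:Int)-1) < (n:Int) ∧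
          f (j:Int) ((k:Int)-1) ≠ INF_NEG) := by
        rintro ⟨-, h2, -⟩; omega
      rw [if_neg c1, if_pos c2]
      simp only [cellVal]
      rw [if_pos hB1, if_neg hB0, cellValW_succ f w n J K hn hK hNE _ _ hk, if_neg c1, e, ej]
    · have hiff : (1 ≤ (k:Int) ∧ (j:Int)*16 + ((k:Int)-1) < ((n+1:Nat):Int) ∧
          f (j:Int) ((k:Int)-1) ≠ INF_NEG) ↔
          (1 ≤ (k:Int) ∧ (j:Int)*16 + ((k:Int)-1) < (n:Int) ∧ f (j:Int) ((k:Int)-1) ≠ INF_NEG) := by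
        constructor
        · rintro ⟨h1, h2, h3⟩
          exact ⟨h1, by omega, h3⟩
        · rintro ⟨h1, h2, h3⟩
          exact ⟨h1, by omega, h3⟩
      rw [if_neg c1, if_neg c2]
      simp only [cellVal]
      rw [if_congr hiff rfl rfl, cellValW_succ f w n J K hn hK hNE _ _ hk, if_neg c1]

theorem cellVal_succ_INF (f : Int → Int → Int) (w b : Int) (n J K : Nat) (hn : n = J*16+K)
    (hJ : J < 16) (hK : K < 16) (hINF : f (J:Int) (K:Int) = INF_NEG)
    (j k : Nat) (hj : j < 16) (hk : k < 16) :
    cellVal f w b (n+1) (j:Int) (k:Int) = cellVal f w b n (j:Int) (k:Int) := by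
  have hW : (1 ≤ (j:Int) ∧ ((j:Int)-1)*16 + (k:Int) < ((n+1:Nat):Int) ∧
      f ((j:Int)-1) (k:Int) ≠ INF_NEG) ↔
      (1 ≤ (j:Int) ∧ ((j:Int)-1)*16 + (k:Int) < (n:Int) ∧ f ((j:Int)-1) (k:Int) ≠ INF_NEG) := by
    constructor
    · rintro ⟨h1, h2, h3⟩
      refine ⟨h1, ?_, h3⟩
      by_cases he : ((j:Int)-1)*16 + (k:Int) = (n:Int)
      · exfalso
        apply h3
        rw [show ((j:Int) - 1) = (J:Int) by omega, show ((k:Int)) = (K:Int) by omega]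
        exact hINF
      · omega
    · rintro ⟨h1, h2, h3⟩
      exact ⟨h1, by omega, h3⟩
  have hB : (1 ≤ (k:Int) ∧ (j:Int)*16 + ((k:Int)-1) < ((n+1:Nat):Int) ∧
      f (j:Int) ((k:Int)-1) ≠ INF_NEG) ↔
      (1 ≤ (k:Int) ∧ (j:Int)*16 + ((k:Int)-1) < (n:Int) ∧ f (j:Int) ((k:Int)-1) ≠ INF_NEG) := by
    constructor
    · rintro ⟨h1, h2, h3⟩
      refine ⟨h1, ?_, h3⟩
      by_cases he : (j:Int)*16 + ((k:Int)-1) = (n:Int)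
      · exfalso
        apply h3
        rw [show ((j:Int)) = (J:Int) by omega, show ((k:Int) - 1) = (K:Int) by omega]
        exact hINF
      · omega
    · rintro ⟨h1, h2, h3⟩
      exact ⟨h1, by omega, h3⟩
  simp only [cellVal, cellValW]
  rw [if_congr hW rfl rfl, if_congr hB rfl rfl]

theorem body_step (f : Int → Int → Int) (w b : Int) (n : Nat) (hn : n < 256) :
    cellBody (tableOf f) w b (tableOf (cellVal f w b n)) ((n/16 : Nat):Int) ((n%16:Nat):Int)
      = tableOf (cellVal f w b (n+1)) := by
  obtain ⟨J, K, hJ, hK, hnn, e1, e2⟩ :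
      ∃ J K, J < 16 ∧ K < 16 ∧ n = J*16+K ∧ n/16 = J ∧ n%16 = K :=
    ⟨n/16, n%16, by omega, by omega, by omega, rfl, rfl⟩
  rw [e1, e2]
  have gDP : get2 (tableOf f) (J:Int) (K:Int) = f (J:Int) (K:Int) :=
    get2_tableOf f _ _ (by omega) (by omega) (by omega) (by omega)
  simp only [cellBody, gDP]
  by_cases hI : f (J:Int) (K:Int) = INF_NEG
  · rw [if_pos (by simp [hI])]
    exact (tableOf_congr _ _ (fun j k hj hk =>
      (cellVal_succ_INF f w b n J K hnn hJ hK hI j k hj hk))).symm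
  · rw [if_neg (by simp [hI])]
    have hmid : (if (J:Int) < 15 then
        (if get2 (tableOf (cellVal f w b n)) ((J:Int)+1) (K:Int) < f (J:Int) (K:Int) + w then
          set2 (tableOf (cellVal f w b n)) ((J:Int)+1) (K:Int) (f (J:Int) (K:Int) + w)
        else tableOf (cellVal f w b n))
      else tableOf (cellVal f w b n))
        = tableOf (fun j' k' => if j' = (J:Int)+1 ∧ k' = (K:Int) ∧ (J:Int) < 15
            then max (cellVal f w b n j' k') (f (J:Int) (K:Int) + w)
            else cellVal f w b n j' k') := by
      by_cases hJ15 : J < 15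
      · rw [if_pos (show (J:Int) < 15 by omega)]
        have gN : get2 (tableOf (cellVal f w b n)) ((J:Int)+1) (K:Int)
            = cellVal f w b n ((J:Int)+1) (K:Int) :=
          get2_tableOf _ _ _ (by omega) (by omega) (by omega) (by omega)
        rw [gN]
        by_cases hlt : cellVal f w b n ((J:Int)+1) (K:Int) < f (J:Int) (K:Int) + w
        · rw [if_pos hlt, set2_tableOf _ _ _ _ (by omega) (by omega) (by omega) (by omega)]
          apply tableOf_congr
          intro j k hj hk
          by_cases d : (j:Int) = (J:Int)+1 ∧ (k:Int) = (K:Int)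
          · rw [if_pos d, if_pos ⟨d.1, d.2, by omega⟩, d.1, d.2]
            exact (max_eq_right hlt.le).symm
          · rw [if_neg d, if_neg (by rintro ⟨x1, x2, -⟩; exact d ⟨x1, x2⟩)]
        · rw [if_neg hlt]
          apply tableOf_congr
          intro j k hj hk
          by_cases d : (j:Int) = (J:Int)+1 ∧ (k:Int) = (K:Int) ∧ (J:Int) < 15
          · rw [if_pos d, d.1, d.2.1]
            exact (max_eq_left (not_lt.mp hlt)).symm
          · rw [if_neg d]
      · rw [if_neg (show ¬(J:Int) < 15 by omega)]
        apply tableOf_congr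
        intro j k hj hk
        rw [if_neg (by rintro ⟨-, -, x3⟩; omega)]
    rw [hmid]
    by_cases hK15 : K < 15
    · rw [if_pos (show (K:Int) < 15 by omega)]
      have gN1 : get2 (tableOf (fun j' k' => if j' = (J:Int)+1 ∧ k' = (K:Int) ∧ (J:Int) < 15
            then max (cellVal f w b n j' k') (f (J:Int) (K:Int) + w)
            else cellVal f w b n j' k')) (J:Int) ((K:Int)+1)
          = cellVal f w b n (J:Int) ((K:Int)+1) := by
        rw [get2_tableOf _ _ _ (by omega) (by omega) (by omega) (by omega)]
        exact if_neg (by rintro ⟨x1, -, -⟩; omega)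
      rw [gN1]
      by_cases hlt : cellVal f w b n (J:Int) ((K:Int)+1) < f (J:Int) (K:Int) + b
      · rw [if_pos hlt, set2_tableOf _ _ _ _ (by omega) (by omega) (by omega) (by omega)]
        apply tableOf_congr
        intro j k hj hk
        rw [cellVal_succ f w b n J K hnn hJ hK hI j k hj hk]
        by_cases d2 : (j:Int) = (J:Int) ∧ (k:Int) = (K:Int)+1
        · rw [if_pos d2, if_neg (by rintro ⟨x1, x2⟩; omega),
            if_pos (show j = J ∧ k = K+1 by constructor <;> omega)]
          rw [d2.1, d2.2]
          exact (max_eq_right hlt.le).symm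
        · rw [if_neg d2]
          by_cases d1 : j = J+1 ∧ k = K
          · rw [if_pos (show (j:Int) = (J:Int)+1 ∧ (k:Int) = (K:Int) ∧ (J:Int) < 15 by
              refine ⟨by omega, by omega, by omega⟩), if_pos d1]
          · rw [if_neg (by rintro ⟨x1, x2, -⟩; exact d1 ⟨by omega, by omega⟩), if_neg d1,
              if_neg (by rintro ⟨x1, x2⟩; exact d2 ⟨by omega, by omega⟩)]
      · rw [if_neg hlt]
        apply tableOf_congr
        intro j k hj hk
        rw [cellVal_succ f w b n J K hnn hJ hK hI j k hj hk]
        by_cases d1 : j = J+1 ∧ k = K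
        · rw [if_pos (show (j:Int) = (J:Int)+1 ∧ (k:Int) = (K:Int) ∧ (J:Int) < 15 by
            refine ⟨by omega, by omega, by omega⟩), if_pos d1]
        · rw [if_neg (by rintro ⟨x1, x2, -⟩; exact d1 ⟨by omega, by omega⟩), if_neg d1]
          by_cases d2 : j = J ∧ k = K+1
          · have hc : (j:Int) = (J:Int) ∧ (k:Int) = (K:Int)+1 := ⟨by omega, by omega⟩
            rw [if_pos d2, hc.1, hc.2]
            exact (max_eq_left (not_lt.mp hlt)).symm
          · rw [if_neg d2]
    · rw [if_neg (show ¬(K:Int) < 15 by omega)]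
      apply tableOf_congr
      intro j k hj hk
      rw [cellVal_succ f w b n J K hnn hJ hK hI j k hj hk]
      by_cases d1 : j = J+1 ∧ k = K
      · rw [if_pos (show (j:Int) = (J:Int)+1 ∧ (k:Int) = (K:Int) ∧ (J:Int) < 15 by
          refine ⟨by omega, by omega, by omega⟩), if_pos d1]
      · rw [if_neg (by rintro ⟨x1, x2, -⟩; exact d1 ⟨by omega, by omega⟩), if_neg d1,
          if_neg (by rintro ⟨x1, x2⟩; omega)]

theorem cellVal_zero (f : Int → Int → Int) (w b : Int) (j k : Nat) :
    cellVal f w b 0 (j:Int) (k:Int) = f (j:Int) (k:Int) := by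
  simp only [cellVal, cellValW]
  rw [if_neg (by rintro ⟨h1, h2, -⟩; omega), if_neg (by rintro ⟨h1, h2, -⟩; omega)]

theorem pairStep_tableOf (f : Int → Int → Int) (p : Int × Int) :
    pairStep (tableOf f) p = tableOf (cellVal f p.1 p.2 256) := by
  have hcopy : (tableOf f).map (fun row => PySem.List.slice row none none) = tableOf f := by
    simp [PySem.List.slice_none_none]
  simp only [pairStep, hcopy]
  have hnest : (PySem.List.pyRange 0 16 1).foldl (fun N j =>
      (PySem.List.pyRange 0 16 1).foldl (fun N k => cellBody (tableOf f) p.1 p.2 N j k) N)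
        (tableOf f)
      = idxAll.foldl (fun N jk => cellBody (tableOf f) p.1 p.2 N jk.1 jk.2) (tableOf f) := by
    rw [idxAll, List.foldl_flatMap]
    simp only [List.foldl_map]
  rw [hnest, idx_enc, List.foldl_map]
  exact foldl_range_inv _ (fun n N => N = tableOf (cellVal f p.1 p.2 n)) 256 _
    (by exact (tableOf_congr _ _ (fun j k hj hk => (cellVal_zero f p.1 p.2 _ _).symm)))
    (fun n t hn ht => by rw [ht]; exact body_step f p.1 p.2 n hn)

theorem wstage (L : List (Int × Int)) (hL : DomP L) (w : Int)
    (hw : -2147483648 ≤ w ∧ w ≤ 2147483648) (j k : Nat) (hj : j < 16) (hk : k < 16) :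
    cellValW (reprF L) w 256 (j:Int) (k:Int)
      = (omax (cb L j k) (wpart w (cb L) j k)).getD INF_NEG := by
  rcases j with _ | j'
  · simp only [cellValW]
    rw [if_neg (by rintro ⟨h1, -, -⟩; omega), wpart, omax_none_right, reprF_natCast]
  · have e : ((j'+1:Nat):Int) - 1 = (j':Int) := by push_cast; ring
    simp only [cellValW, wpart]
    cases hY : cb L j' k with
    | none =>
      rw [oadd_none, omax_none_right]
      rw [if_neg ?_, reprF_natCast]
      rintro ⟨-, -, h3⟩
      exact h3 (by rw [e, reprF_natCast, hY]; rfl)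
    | some t =>
      have ht := cb_val_bounds L hL j' k (by omega) (by omega) t hY
      rw [if_pos ?_]
      · rw [e, reprF_natCast, reprF_natCast, hY]
        simp only [Option.getD_some, oadd]
        rw [show t + w = w + t by ring]
        exact omax_getD _ _ (by rw [INF_NEG_eq]; omega)
      · refine ⟨by push_cast; omega, by push_cast; omega, ?_⟩
        rw [e, reprF_natCast, hY]
        simp only [Option.getD_some]
        exact cb_ne_INF L hL j' k (by omega) (by omega) t hY

theorem step_repr (L : List (Int × Int)) (p : Int × Int) (hL : DomP (L ++ [p]))
    (j k : Nat) (hj : j < 16) (hk : k < 16) :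
    cellVal (reprF L) p.1 p.2 256 (j:Int) (k:Int) = reprF (L ++ [p]) (j:Int) (k:Int) := by
  have hp := hL p (by simp)
  have hL' : DomP L := fun q hq => hL q (by simp [hq])
  rw [reprF_natCast, cb_append]
  simp only [cstep]
  rcases k with _ | k'
  · simp only [cellVal]
    rw [if_neg (by rintro ⟨h1, -, -⟩; omega)]
    rw [wstage L hL' p.1 hp.1 j 0 hj (by omega)]
    simp only [bpart, omax_none_right]
  · have e : ((k'+1:Nat):Int) - 1 = (k':Int) := by push_cast; ring
    simp only [cellVal, bpart]
    cases hZ : cb L j k' with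
    | none =>
      rw [oadd_none, omax_none_right]
      rw [if_neg ?_]
      · rw [wstage L hL' p.1 hp.1 j (k'+1) hj (by omega)]
      · rintro ⟨-, -, h3⟩
        exact h3 (by rw [e, reprF_natCast, hZ]; rfl)
    | some u =>
      have hu := cb_val_bounds L hL' j k' (by omega) (by omega) u hZ
      rw [if_pos ?_]
      · rw [e, reprF_natCast, hZ]
        simp only [Option.getD_some, oadd]
        rw [wstage L hL' p.1 hp.1 j (k'+1) hj (by omega)]
        rw [show u + p.2 = p.2 + u by ring]
        rw [omax_getD _ _ (by rw [INF_NEG_eq]; omega), ← omax_assoc]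
      · refine ⟨by push_cast; omega, by push_cast; omega, ?_⟩
        rw [e, reprF_natCast, hZ]
        simp only [Option.getD_some]
        exact cb_ne_INF L hL' j k' (by omega) (by omega) u hZ

set_option maxRecDepth 8192 in
theorem a_base :
    set2 ((PySem.List.pyRange 0 16 1).map (fun _ => List.replicate 16 INF_NEG)) 0 0 0
      = tableOf (reprF []) := by
  decide

theorem a_table (L : List (Int × Int)) (hL : DomP L) :
    L.foldl pairStep (set2 ((PySem.List.pyRange 0 16 1).map (fun _ => List.replicate 16 INF_NEG)) 0 0 0)
      = tableOf (reprF L) := by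
  induction L using List.reverseRecOn with
  | nil => simpa using a_base
  | append_singleton L p ih =>
    have hL' : DomP L := fun q hq => hL q (by simp [hq])
    rw [List.foldl_append, ih hL', List.foldl_cons, List.foldl_nil,
      pairStep_tableOf (reprF L) p]
    exact tableOf_congr _ _ (fun j k hj hk => step_repr L p hL j k hj hk)

theorem solve_eq (pairs : List (Int × Int)) (hL : DomP pairs) :
    solve pairs = (cb pairs 15 15).getD INF_NEG := by
  simp only [solve]
  rw [a_table pairs hL, get2_tableOf _ _ _ (by omega) (by omega) (by omega) (by omega)]
  simp [reprF]

set_option maxRecDepth 4096 in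
theorem idx_nodup : idxAll.Nodup := by decide

theorem layer_getD (h : Int × Int → Option Int) (J K : Nat) (hJ : J < 16) (hK : K < 16) :
    PySem.Dict.getD (layer h) ((J : Int), (K : Int)) none = h ((J : Int), (K : Int)) := by
  have hmem : ((J : Int), (K : Int)) ∈ idxAll := by
    rw [idxAll, List.mem_flatMap]
    refine ⟨(J : Int), ?_, ?_⟩
    · rw [PySem.List.mem_pyRange_one]
      omega
    · rw [List.mem_map]
      refine ⟨(K : Int), ?_, rfl⟩
      rw [PySem.List.mem_pyRange_one]
      omega
  have hitems : (layer h).items = idxAll.map (fun jk => (jk, h jk)) := by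
    rw [layer]
    have := PySem.Dict.items_foldl_insert_fresh idxAll id h PySem.Dict.empty
      (fun a _ => PySem.Dict.contains_empty (id a)) (by simpa using idx_nodup)
    simpa using this
  have hnd : (layer h).keys.Nodup := by
    rw [layer]
    exact PySem.Dict.nodup_keys_foldl_insert idxAll (fun _ jk => h jk) PySem.Dict.empty
      PySem.Dict.nodup_keys_empty
  exact PySem.Dict.getD_of_mem_items (layer h)
    (by rw [hitems]; exact List.mem_map.mpr ⟨_, hmem, rfl⟩) hnd none

theorem pullB_spec (g : PySem.Dict (Int × Int) (Option Int)) (S : List (Int × Int)) (w b : Int)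
    (Hg : ∀ (j' k' : Nat), j' < 16 → k' < 16 →
      PySem.Dict.getD g ((j' : Int), (k' : Int)) none = cb S (15 - j') (15 - k'))
    (j k : Nat) (hj : j < 16) (hk : k < 16) :
    pullB g w b (j : Int) (k : Int) = cstep w b (cb S) (15 - j) (15 - k) := by
  have h0 := Hg j k hj hk
  simp only [pullB, h0, cstep]
  have hW : (if (j:Int) < 15 then
      (match PySem.Dict.getD g ((j:Int)+1, (k:Int)) none with
       | some t =>
         (match cb S (15 - j) (15 - k) with
          | none => some (w + t)
          | some bv => if bv < w + t then some (w + t) else some bv)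
       | none => cb S (15 - j) (15 - k))
    else cb S (15 - j) (15 - k))
      = omax (cb S (15 - j) (15 - k)) (wpart w (cb S) (15 - j) (15 - k)) := by
    by_cases hj15 : j < 15
    · have e1 : ((j:Int)+1) = ((j+1:Nat):Int) := by push_cast; ring
      have h1 := Hg (j+1) k (by omega) hk
      have e2 : 15 - j = (15 - (j+1)) + 1 := by omega
      rw [if_pos (show (j:Int) < 15 by omega), e1, h1, e2]
      simp only [wpart]
      cases hZ : cb S (15 - (j+1)) (15 - k) with
      | none => rw [oadd_none, omax_none_right]
      | some t =>
        simp only [oadd]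
        cases hB : cb S (15 - (j + 1) + 1) (15 - k) with
        | none => rfl
        | some bv =>
          simp only [omax, Option.some_inj]
          rcases lt_or_ge bv (w + t) with h | h
          · rw [if_pos h, max_eq_right h.le]
          · rw [if_neg (not_lt.mpr h), max_eq_left h]
    · rw [if_neg (show ¬(j:Int) < 15 by omega), show 15 - j = 0 by omega]
      simp only [wpart, omax_none_right]
  rw [hW]
  by_cases hk15 : k < 15
  · have e3 : ((k:Int)+1) = ((k+1:Nat):Int) := by push_cast; ring
    have h2 := Hg j (k+1) hj (by omega)
    have e4 : 15 - k = (15 - (k+1)) + 1 := by omega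
    rw [if_pos (show (k:Int) < 15 by omega), e3, h2, e4]
    simp only [bpart]
    cases hZ : cb S (15 - j) (15 - (k+1)) with
    | none => rw [oadd_none, omax_none_right]
    | some u =>
      simp only [oadd]
      rw [← omax_assoc]
      cases hB : omax (cb S (15 - j) (15 - (k+1) + 1)) (wpart w (cb S) (15 - j) (15 - (k+1) + 1)) with
      | none => rfl
      | some bv =>
        simp only [omax, Option.some_inj]
        rcases lt_or_ge bv (b + u) with h | h
        · rw [if_pos h, max_eq_right h.le]
        · rw [if_neg (not_lt.mpr h), max_eq_left h]
  · rw [if_neg (show ¬(k:Int) < 15 by omega), show 15 - k = 0 by omega]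
    simp only [bpart, omax_none_right]

theorem b_table (T : List (Int × Int)) (j k : Nat) (hj : j < 16) (hk : k < 16) :
    PySem.Dict.getD
      (T.foldl (fun g p => layer (fun jk => pullB g p.1 p.2 jk.1 jk.2))
        (layer (fun jk => if jk.1 == 15 && jk.2 == 15 then some 0 else none)))
      ((j : Int), (k : Int)) none
      = cb T.reverse (15 - j) (15 - k) := by
  induction T using List.reverseRecOn generalizing j k with
  | nil =>
    rw [List.foldl_nil, layer_getD _ j k hj hk]
    simp only [List.reverse_nil, cb]
    by_cases hjk : j = 15 ∧ k = 15
    · rw [if_pos (show ((j:Int) == 15 && (k:Int) == 15) = true by simp [hjk.1, hjk.2]),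
        if_pos (show 15 - j = 0 ∧ 15 - k = 0 by omega)]
    · rw [if_neg (show ¬((j:Int) == 15 && (k:Int) == 15) = true by
          simp only [Bool.and_eq_true, beq_iff_eq]
          rintro ⟨x1, x2⟩
          exact hjk ⟨by omega, by omega⟩),
        if_neg (show ¬(15 - j = 0 ∧ 15 - k = 0) by omega)]
  | append_singleton T p ih =>
    rw [List.foldl_append, List.foldl_cons, List.foldl_nil, layer_getD _ j k hj hk]
    have := pullB_spec _ T.reverse p.1 p.2 (fun j' k' hj' hk' => ih j' k' hj' hk') j k hj hk
    rw [this, List.reverse_append]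
    simp only [List.reverse_cons, List.reverse_nil, List.nil_append, List.singleton_append, cb]

theorem solve_alt_eq (pairs : List (Int × Int)) :
    solve_alt pairs = (cb pairs 15 15).getD INF_NEG := by
  simp only [solve_alt]
  have h := b_table pairs.reverse 0 0 (by omega) (by omega)
  rw [List.reverse_reverse] at h
  rw [show ((0:Nat):Int) = (0:Int) by norm_num] at h
  rw [h]
  cases hv : cb pairs (15 - 0) (15 - 0) with
  | none => rfl
  | some v => rfl

theorem dom_to_domP (pairs : List (Int × Int)) (h : Dom_solve pairs) : DomP pairs := by
  intro q hq
  have := (List.all_eq_true.mp h) q hq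
  simp only [Bool.and_eq_true, pvDomInt, decide_eq_true_eq] at this
  exact ⟨this.1, this.2⟩

-- ===== VERDICT (by name: the statement is the Claim_ definition above) =====
theorem solve_spec : Claim_equal_solve := by
  intro pairs hdom
  unfold Spec_solve
  rw [solve_eq pairs (dom_to_domP pairs hdom), solve_alt_eq pairs]
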